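-- pv_equiv track=rewrite | github.com/KiloMusician/ChatDev2 | ecosystem/Dev-Mentor/scripts/rimworld_smoke_test.py | insert_before_first_ludeon
-- ===== SOURCE A (Python) =====
-- from collections.abc import Iterable
--
-- def dedupe_preserve_order(mods: Iterable[str]) -> list[str]:
--     seen: set[str] = set()
--     ordered: list[str] = []
--     for mod in mods:
--         if mod not in seen:
--             ordered.append(mod)
--             seen.add(mod)
--     return ordered
--
-- def insert_before_first_ludeon(mods: list[str], inserts: list[str]) -> list[str]:
--     ordered = dedupe_preserve_order(inserts)
--     if not ordered:
--         return mods[:]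
--     out = [mod for mod in mods if mod not in ordered]
--     idx = next(
--         (i for i, mod in enumerate(out) if mod.startswith("ludeon.rimworld")), len(out)
--     )
--     for mod in reversed(ordered):
--         out.insert(idx, mod)
--     return out
-- ===== SOURCE B (Python) =====
-- def insert_before_first_ludeon(mods: list[str], inserts: list[str]) -> list[str]:
--     d = dict.fromkeys(inserts)  # ordered dedupe; also the O(1) membership index
--     out: list[str] = []
--     inserted = False
--     for mod in mods:
--         if mod in d:
--             continue
--         if not inserted and mod.startswith("ludeon.rimworld"):
--             out.extend(d)
--             inserted = True
--         out.append(mod)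
--     if not inserted:
--         out.extend(d)
--     return out
-- ===== Notes on version B (the rewrite author's own statement) =====
-- stated objective: faster
-- what changed: Replaces A's three passes (list-membership filter, enumerate-scan for the first ludeon index, repeated list.insert splice) with one fused pass over mods keeping an 'inserted' flag, and dedupes via dict.fromkeys which also serves as an O(1) membership index.
import Mathlib
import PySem

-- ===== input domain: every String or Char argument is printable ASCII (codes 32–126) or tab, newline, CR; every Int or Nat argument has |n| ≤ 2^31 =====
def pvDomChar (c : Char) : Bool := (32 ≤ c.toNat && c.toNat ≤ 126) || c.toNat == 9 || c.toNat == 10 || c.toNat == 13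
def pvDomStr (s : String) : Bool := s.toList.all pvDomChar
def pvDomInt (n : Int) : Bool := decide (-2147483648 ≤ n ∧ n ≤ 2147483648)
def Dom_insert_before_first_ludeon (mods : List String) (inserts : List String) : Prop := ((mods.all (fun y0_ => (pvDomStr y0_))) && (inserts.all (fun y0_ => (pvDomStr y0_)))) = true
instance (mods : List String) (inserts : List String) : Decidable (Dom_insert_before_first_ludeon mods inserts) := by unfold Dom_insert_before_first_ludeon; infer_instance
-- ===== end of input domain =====

-- B fuses A's filter / first-ludeon scan / splice into one pass over mods with an 'inserted'
-- flag, deduping inserts via dict.fromkeys (return value only; neither mutates its arguments).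

-- ===== PORT A =====
-- dedupe_preserve_order: seen-set + ordered-list accumulator
def pvDedupeA (mods : List String) : List String :=
  (mods.foldl
    (fun (st : PySem.Set String × List String) m =>
      if PySem.Set.contains st.1 m then st else (PySem.Set.add st.1 m, st.2 ++ [m]))
    (PySem.Set.empty, [])).2

-- next((i for i, mod in enumerate(out) if mod.startswith("ludeon.rimworld")), len(out))
def pvFirstLudeonIdx : List String → Nat
  | [] => 0
  | m :: rest =>
      if PySem.Str.startswith m "ludeon.rimworld" then 0 else pvFirstLudeonIdx rest + 1

def insert_before_first_ludeon (mods : List String) (inserts : List String) : List String :=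
  let ordered := pvDedupeA inserts
  if ordered = [] then mods
  else
    let out := mods.filter (fun m => !(ordered.contains m))
    let idx := pvFirstLudeonIdx out
    ordered.reverse.foldl (fun acc m => PySem.List.insert acc (idx : Int) m) out

-- ===== PORT B =====
def insert_before_first_ludeon_alt (mods : List String) (inserts : List String) : List String :=
  let d := PySem.List.dedup inserts          -- d = dict.fromkeys(inserts): keys in first-occurrence order
  let r := mods.foldl
    (fun (st : List String × Bool) m =>
      if d.contains m then st                -- mod in d → continue
      else if !st.2 && PySem.Str.startswith m "ludeon.rimworld" then (st.1 ++ d ++ [m], true)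
      else (st.1 ++ [m], st.2))
    ([], false)
  if r.2 then r.1 else r.1 ++ d

-- ===== PRECONDITION & SPEC =====
def Spec_insert_before_first_ludeon (mods : List String) (inserts : List String) (out : List String) : Prop := out = insert_before_first_ludeon_alt mods inserts
instance (mods : List String) (inserts : List String) (out : List String) : Decidable (Spec_insert_before_first_ludeon mods inserts out) := by unfold Spec_insert_before_first_ludeon; infer_instance

-- ===== CLAIM (what is proved, stated in full; the proofs are below) =====
def Claim_equal_insert_before_first_ludeon : Prop := ∀ (mods : List String) (inserts : List String), Dom_insert_before_first_ludeon mods inserts → Spec_insert_before_first_ludeon mods inserts (insert_before_first_ludeon mods inserts)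

-- ===== LEMMAS AND PROOFS =====

-- A's dedupe equals dict.fromkeys dedupe (the seen-set and the ordered list evolve identically)
theorem pvDedupeA_aux (l : List String) (s : List String) :
    l.foldl
      (fun (st : PySem.Set String × List String) m =>
        if PySem.Set.contains st.1 m then st else (PySem.Set.add st.1 m, st.2 ++ [m]))
      (s, s)
    = (l.foldl PySem.Set.add s, l.foldl PySem.Set.add s) := by
  induction l generalizing s with
  | nil => rfl
  | cons m rest ih =>
    simp only [List.foldl_cons]
    by_cases hm : m ∈ s
    · rw [if_pos ((PySem.Set.contains_iff s m).mpr hm), PySem.Set.add_of_mem hm]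
      exact ih s
    · rw [if_neg (fun h => hm ((PySem.Set.contains_iff s m).mp h)), PySem.Set.add_of_not_mem hm]
      exact ih (s ++ [m])

theorem pvDedupeA_eq (l : List String) : pvDedupeA l = PySem.List.dedup l := by
  unfold pvDedupeA
  rw [show (PySem.Set.empty, ([] : List String)) = (([] : List String), ([] : List String)) from rfl,
    pvDedupeA_aux l [], PySem.List.dedup_eq_ofList, PySem.Set.ofList_eq_foldl]

theorem pvFirstLudeonIdx_le (l : List String) : pvFirstLudeonIdx l ≤ l.length := by
  induction l with
  | nil => simp [pvFirstLudeonIdx]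
  | cons m rest ih =>
    simp only [pvFirstLudeonIdx, List.length_cons]
    split <;> omega

-- A's reversed-insert loop is a splice at idx
theorem pvInsertFold (ord : List String) (l : List String) (idx : Nat) (h : idx ≤ l.length) :
    ord.reverse.foldl (fun acc m => PySem.List.insert acc (idx : Int) m) l
      = l.take idx ++ ord ++ l.drop idx := by
  rw [List.foldl_reverse]
  induction ord with
  | nil => simp
  | cons m t ih =>
    simp only [List.foldr_cons, ih, List.append_assoc]
    rw [PySem.List.insert_natCast _ idx m (by simp [List.length_take]; omega)]
    rw [List.take_left' (by simp [List.length_take]; omega),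
        List.drop_left' (by simp [List.length_take]; omega)]
    simp

-- B's fold: shifting the output accumulator out of the loop state
theorem pvStepShift (d : List String) (l : List String) (acc : List String) (ins : Bool) :
    l.foldl
      (fun (st : List String × Bool) m =>
        if d.contains m then st
        else if !st.2 && PySem.Str.startswith m "ludeon.rimworld" then (st.1 ++ d ++ [m], true)
        else (st.1 ++ [m], st.2))
      (acc, ins)
    = (acc ++ (l.foldl
        (fun (st : List String × Bool) m =>
          if d.contains m then st
          else if !st.2 && PySem.Str.startswith m "ludeon.rimworld" then (st.1 ++ d ++ [m], true)
          else (st.1 ++ [m], st.2))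
        ([], ins)).1,
       (l.foldl
        (fun (st : List String × Bool) m =>
          if d.contains m then st
          else if !st.2 && PySem.Str.startswith m "ludeon.rimworld" then (st.1 ++ d ++ [m], true)
          else (st.1 ++ [m], st.2))
        ([], ins)).2) := by
  induction l generalizing acc ins with
  | nil => simp
  | cons m rest ih =>
    simp only [List.foldl_cons]
    dsimp only [List.nil_append]
    by_cases hc : d.contains m = true
    · simp only [hc, reduceIte]
      exact ih acc ins
    · have hc0 : d.contains m = false := by simpa using hc
      simp only [hc0, Bool.false_eq_true, reduceIte]
      by_cases hb : PySem.Str.startswith m "ludeon.rimworld" = true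
      · cases ins with
        | false =>
          simp only [hb, Bool.not_false, Bool.true_and, reduceIte]
          rw [ih (acc ++ d ++ [m]) true, ih (d ++ [m]) true]
          simp
        | true =>
          simp only [Bool.not_true, Bool.false_and, Bool.false_eq_true, reduceIte]
          rw [ih (acc ++ [m]) true, ih [m] true]
          simp
      · have hb0 : PySem.Str.startswith m "ludeon.rimworld" = false := by simpa using hb
        simp only [hb0, Bool.and_false, Bool.false_eq_true, reduceIte]
        rw [ih (acc ++ [m]) ins, ih [m] ins]
        simp

-- once inserted, B's remaining pass is exactly A's filter
theorem pvStepTrue (d : List String) (l : List String) :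
    l.foldl
      (fun (st : List String × Bool) m =>
        if d.contains m then st
        else if !st.2 && PySem.Str.startswith m "ludeon.rimworld" then (st.1 ++ d ++ [m], true)
        else (st.1 ++ [m], st.2))
      ([], true)
    = (l.filter (fun m => !(d.contains m)), true) := by
  induction l with
  | nil => simp
  | cons m rest ih =>
    simp only [List.foldl_cons]
    dsimp only [List.nil_append]
    by_cases hc : d.contains m = true
    · have hm : m ∈ d := by simpa using hc
      simp only [hc, reduceIte]
      rw [ih]
      simp [hm]
    · have hc0 : d.contains m = false := by simpa using hc
      have hm : m ∉ d := by simpa using hc0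
      simp only [hc0, Bool.false_eq_true, Bool.not_true, Bool.false_and, reduceIte]
      rw [pvStepShift d rest [m] true, ih]
      simp [hm]

-- the fused pass computes the filter-and-splice formula
theorem pvAltFormula (d : List String) (l : List String) :
    (if (l.foldl
          (fun (st : List String × Bool) m =>
            if d.contains m then st
            else if !st.2 && PySem.Str.startswith m "ludeon.rimworld" then (st.1 ++ d ++ [m], true)
            else (st.1 ++ [m], st.2))
          ([], false)).2
      then (l.foldl
          (fun (st : List String × Bool) m =>
            if d.contains m then st
            else if !st.2 && PySem.Str.startswith m "ludeon.rimworld" then (st.1 ++ d ++ [m], true)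
            else (st.1 ++ [m], st.2))
          ([], false)).1
      else (l.foldl
          (fun (st : List String × Bool) m =>
            if d.contains m then st
            else if !st.2 && PySem.Str.startswith m "ludeon.rimworld" then (st.1 ++ d ++ [m], true)
            else (st.1 ++ [m], st.2))
          ([], false)).1 ++ d)
    = (l.filter (fun m => !(d.contains m))).take
        (pvFirstLudeonIdx (l.filter (fun m => !(d.contains m))))
      ++ d
      ++ (l.filter (fun m => !(d.contains m))).drop
        (pvFirstLudeonIdx (l.filter (fun m => !(d.contains m)))) := by
  induction l with
  | nil => simp [pvFirstLudeonIdx]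
  | cons m rest ih =>
    simp only [List.foldl_cons]
    dsimp only [List.nil_append]
    by_cases hc : d.contains m = true
    · have hm : m ∈ d := by simpa using hc
      simp only [hc, reduceIte]
      rw [ih]
      simp [hm]
    · have hc0 : d.contains m = false := by simpa using hc
      have hm : m ∉ d := by simpa using hc0
      simp only [hc0, Bool.false_eq_true, reduceIte]
      by_cases hb : PySem.Str.startswith m "ludeon.rimworld" = true
      · simp only [hb, Bool.not_false, Bool.true_and, reduceIte]
        rw [pvStepShift d rest (d ++ [m]) true, pvStepTrue d rest]
        have hfil : (m :: rest).filter (fun m => !(d.contains m))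
            = m :: rest.filter (fun m => !(d.contains m)) := by
          simp [hm]
        have hidx : pvFirstLudeonIdx (m :: rest.filter (fun m => !(d.contains m))) = 0 := by
          simp only [pvFirstLudeonIdx, hb, reduceIte]
        rw [hfil, hidx]
        simp [List.append_assoc]
      · have hb0 : PySem.Str.startswith m "ludeon.rimworld" = false := by simpa using hb
        simp only [hb0, Bool.not_false, Bool.true_and, Bool.false_eq_true, reduceIte]
        rw [pvStepShift d rest [m] false]
        dsimp only
        simp only [List.singleton_append]
        have push : ∀ (b : Bool) (x : List String),
            (if b = true then m :: x else (m :: x) ++ d) = m :: (if b = true then x else x ++ d) := by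
          intro b x; cases b <;> simp
        rw [push]
        rw [ih]
        have hfil : (m :: rest).filter (fun m => !(d.contains m))
            = m :: rest.filter (fun m => !(d.contains m)) := by
          simp [hm]
        have hidx : pvFirstLudeonIdx (m :: rest.filter (fun m => !(d.contains m)))
            = pvFirstLudeonIdx (rest.filter (fun m => !(d.contains m))) + 1 := by
          simp only [pvFirstLudeonIdx, hb0, Bool.false_eq_true, reduceIte]
        rw [hfil, hidx]
        simp [List.append_assoc]

-- ===== VERDICT (by name: the statement is the Claim_ definition above) =====
theorem insert_before_first_ludeon_spec : Claim_equal_insert_before_first_ludeon := by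
  intro mods inserts _
  unfold Spec_insert_before_first_ludeon
  unfold insert_before_first_ludeon insert_before_first_ludeon_alt
  dsimp only
  rw [pvDedupeA_eq, pvAltFormula (PySem.List.dedup inserts) mods]
  by_cases hord : PySem.List.dedup inserts = []
  · rw [if_pos hord, hord]
    simp
  · rw [if_neg hord, pvInsertFold _ _ _ (pvFirstLudeonIdx_le _)]
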